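-- pv_equiv track=rewrite | github.com/laserpilot/this-is-a-pipe | pipes-v1.py | get_constrained_possibilities
-- ===== SOURCE A (Python) =====
-- OPENINGS = {
--     'r': {'S', 'E'},      # down and right
--     '7': {'S', 'W'},      # down and left
--     'j': {'N', 'W'},      # up and left
--     'L': {'N', 'E'},      # up and right
--     '|': {'N', 'S'},      # vertical
--     '-': {'E', 'W'},      # horizontal
--     '+': {'N', 'S', 'E', 'W'},  # all directions (crossover)
-- }
--
-- def has_opening(ch, direction):
--     """Check if a pipe piece has an opening in the given direction (N/S/E/W)"""
--     return direction in OPENINGS.get(ch, set())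
--
-- def get_constrained_possibilities(possibilities, x, y, width, height):
--     """Given border constraints, return valid possibilities for a cell"""
--     valid = possibilities.copy()
--
--     # Border constraints: edges can't have openings pointing outward
--     # (unless you want pipes going off-screen - set allow_edge_openings=True)
--     allow_edge_openings = False
--
--     if not allow_edge_openings:
--         if x == 0:  # Left edge - no west openings
--             valid = {ch for ch in valid if not has_opening(ch, 'W')}
--         if x == width - 1:  # Right edge - no east openings
--             valid = {ch for ch in valid if not has_opening(ch, 'E')}
--         if y == 0:  # Top edge - no north openings
--             valid = {ch for ch in valid if not has_opening(ch, 'N')}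
--         if y == height - 1:  # Bottom edge - no south openings
--             valid = {ch for ch in valid if not has_opening(ch, 'S')}
--
--     return valid
-- ===== SOURCE B (Python) =====
-- OPENINGS = {
--     'r': {'S', 'E'},
--     '7': {'S', 'W'},
--     'j': {'N', 'W'},
--     'L': {'N', 'E'},
--     '|': {'N', 'S'},
--     '-': {'E', 'W'},
--     '+': {'N', 'S', 'E', 'W'},
-- }
--
-- def get_constrained_possibilities(possibilities, x, y, width, height):
--     forbidden = set()
--     if x == 0:
--         forbidden.add('W')
--     if x == width - 1:
--         forbidden.add('E')
--     if y == 0: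
--         forbidden.add('N')
--     if y == height - 1:
--         forbidden.add('S')
--     return {ch for ch in possibilities if not (OPENINGS.get(ch, set()) & forbidden)}
-- ===== Notes on version B (the rewrite author's own statement) =====
-- stated objective: simpler
-- what changed: B first computes the set of forbidden outward directions from the border position, then keeps in one comprehension exactly the pieces whose opening set is disjoint from it, replacing A's four sequential narrowing filter passes.
import Mathlib
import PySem

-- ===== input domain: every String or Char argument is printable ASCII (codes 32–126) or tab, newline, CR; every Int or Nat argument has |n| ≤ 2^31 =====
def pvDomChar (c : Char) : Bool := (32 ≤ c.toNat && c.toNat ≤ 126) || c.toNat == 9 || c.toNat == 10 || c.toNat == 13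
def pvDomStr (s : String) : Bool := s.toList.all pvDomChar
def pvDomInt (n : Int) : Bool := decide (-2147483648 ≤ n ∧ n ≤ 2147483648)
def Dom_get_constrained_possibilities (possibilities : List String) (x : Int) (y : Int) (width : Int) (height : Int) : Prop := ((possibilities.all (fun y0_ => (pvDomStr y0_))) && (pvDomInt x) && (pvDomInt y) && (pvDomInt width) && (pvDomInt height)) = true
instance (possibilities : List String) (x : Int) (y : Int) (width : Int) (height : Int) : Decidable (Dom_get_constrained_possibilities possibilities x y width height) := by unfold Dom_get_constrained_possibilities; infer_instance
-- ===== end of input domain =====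

-- B replaces A's four sequential narrowing filter passes by one forbidden-direction
-- set plus a single disjointness filter pass (objective: simpler).

-- ===== PORT A =====
-- the OPENINGS table: openings of a pipe piece; unknown pieces have none
def pvOpenings (ch : String) : List String :=
  if ch = "r" then ["S", "E"]
  else if ch = "7" then ["S", "W"]
  else if ch = "j" then ["N", "W"]
  else if ch = "L" then ["N", "E"]
  else if ch = "|" then ["N", "S"]
  else if ch = "-" then ["E", "W"]
  else if ch = "+" then ["N", "S", "E", "W"]
  else []

-- has_opening(ch, direction)
def pvHasOpening (ch : String) (d : String) : Bool := (pvOpenings ch).contains d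

def get_constrained_possibilities (possibilities : List String) (x : Int) (y : Int) (width : Int) (height : Int) : List String :=
  let valid := possibilities
  let valid := if x = 0 then valid.filter (fun ch => !pvHasOpening ch "W") else valid
  let valid := if x = width - 1 then valid.filter (fun ch => !pvHasOpening ch "E") else valid
  let valid := if y = 0 then valid.filter (fun ch => !pvHasOpening ch "N") else valid
  let valid := if y = height - 1 then valid.filter (fun ch => !pvHasOpening ch "S") else valid
  valid

-- ===== PORT B =====
-- forbidden outward directions for this border position
def pvForbidden (x : Int) (y : Int) (width : Int) (height : Int) : List String :=
  (if x = 0 then ["W"] else []) ++ (if x = width - 1 then ["E"] else []) ++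
  (if y = 0 then ["N"] else []) ++ (if y = height - 1 then ["S"] else [])

def get_constrained_possibilities_alt (possibilities : List String) (x : Int) (y : Int) (width : Int) (height : Int) : List String :=
  let forbidden := pvForbidden x y width height
  possibilities.filter (fun ch => (pvOpenings ch).all (fun d => !forbidden.contains d))

-- ===== PRECONDITION & SPEC =====
def Spec_get_constrained_possibilities (possibilities : List String) (x : Int) (y : Int) (width : Int) (height : Int) (out : List String) : Prop := out = get_constrained_possibilities_alt possibilities x y width height
instance (possibilities : List String) (x : Int) (y : Int) (width : Int) (height : Int) (out : List String) : Decidable (Spec_get_constrained_possibilities possibilities x y width height out) := by unfold Spec_get_constrained_possibilities; infer_instance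

-- ===== CLAIM (what is proved, stated in full; the proofs are below) =====
def Claim_equal_get_constrained_possibilities : Prop := ∀ (possibilities : List String) (x : Int) (y : Int) (width : Int) (height : Int), Dom_get_constrained_possibilities possibilities x y width height → Spec_get_constrained_possibilities possibilities x y width height (get_constrained_possibilities possibilities x y width height)

-- ===== LEMMAS AND PROOFS =====
-- filtering by disjointness from an appended forbidden list = two successive filters
theorem pv_filter_all_append (l : List String) (fa fb : List String) :
    l.filter (fun ch => (pvOpenings ch).all (fun d => !(fa ++ fb).contains d)) =
      (l.filter (fun ch => (pvOpenings ch).all (fun d => !fa.contains d))).filter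
        (fun ch => (pvOpenings ch).all (fun d => !fb.contains d)) := by
  rw [List.filter_filter]
  apply List.filter_congr
  intro ch _
  rw [Bool.eq_iff_iff]
  simp
  constructor
  · exact fun h => ⟨fun a ha => (h a ha).2, fun a ha => (h a ha).1⟩
  · exact fun h a ha => ⟨h.2 a ha, h.1 a ha⟩

-- disjointness from a singleton forbidden list = A's per-direction test
theorem pv_filter_single (l : List String) (s : String) :
    l.filter (fun ch => (pvOpenings ch).all (fun d => !([s] : List String).contains d)) =
      l.filter (fun ch => !pvHasOpening ch s) := by
  apply List.filter_congr
  intro ch _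
  rw [Bool.eq_iff_iff]
  simp [pvHasOpening]
  exact ⟨fun h hs => h s hs rfl, fun h d hd he => h (he ▸ hd)⟩

-- empty forbidden list filters nothing away
theorem pv_filter_nil (l : List String) :
    l.filter (fun ch => (pvOpenings ch).all (fun d => !([] : List String).contains d)) = l := by
  simp

theorem get_constrained_possibilities_spec : Claim_equal_get_constrained_possibilities := by
  intro possibilities x y width height _
  unfold Spec_get_constrained_possibilities
  unfold get_constrained_possibilities get_constrained_possibilities_alt pvForbidden
  split_ifs <;>
    simp only [pv_filter_all_append, pv_filter_single, pv_filter_nil]
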